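-- pv_equiv track=rewrite | github.com/andre98king/giochidicoopia | auto_update.py | derive_coop_modes
-- ===== SOURCE A (Python) =====
-- def derive_coop_modes(steam_cats_list):
--     """Deriva coopMode dalle categorie Steam (lista di stringhe lowercase)."""
--     modes = []
--     has_online = any('online' in c and ('co-op' in c or 'multi' in c) for c in steam_cats_list)
--     has_local = any(('local' in c and ('co-op' in c or 'multi' in c)) or 'couch' in c for c in steam_cats_list)
--     has_split = any('split' in c for c in steam_cats_list)
--     if has_online or (not has_local and not has_split):
--         modes.append('online')
--     if has_local or has_split:
--         modes.append('local')
--     if has_split: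
--         modes.append('split')
--     return modes if modes else ['online']
-- ===== SOURCE B (Python) =====
-- _COOP_TABLE = [
--     ['online'],                      # 000: nothing detected -> default
--     ['online'],                      # 001: online
--     ['local'],                       # 010: local
--     ['online', 'local'],             # 011
--     ['local', 'split'],              # 100: split
--     ['online', 'local', 'split'],    # 101
--     ['local', 'split'],              # 110
--     ['online', 'local', 'split'],    # 111
-- ]
--
--
-- def _cat_mask(c):
--     """3-bit mask for one category string: bit0=online, bit1=local, bit2=split."""
--     coop_or_multi = 'co-op' in c or 'multi' in c
--     return (
--         (1 if 'online' in c and coop_or_multi else 0)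
--         | (2 if ('local' in c and coop_or_multi) or 'couch' in c else 0)
--         | (4 if 'split' in c else 0)
--     )
--
--
-- def derive_coop_modes(steam_cats_list):
--     """Deriva coopMode dalle categorie Steam (lista di stringhe lowercase)."""
--     mask = 0
--     for c in steam_cats_list:
--         mask |= _cat_mask(c)
--     return list(_COOP_TABLE[mask])
-- ===== Notes on version B (the rewrite author's own statement) =====
-- stated objective: alternative
-- what changed: Each category is classified into a 3-bit mask, the masks are OR-reduced in one pass, and the result is read from a precomputed 8-entry lookup table, replacing A's three any() scans plus conditional list-building branches.
import Mathlib
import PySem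

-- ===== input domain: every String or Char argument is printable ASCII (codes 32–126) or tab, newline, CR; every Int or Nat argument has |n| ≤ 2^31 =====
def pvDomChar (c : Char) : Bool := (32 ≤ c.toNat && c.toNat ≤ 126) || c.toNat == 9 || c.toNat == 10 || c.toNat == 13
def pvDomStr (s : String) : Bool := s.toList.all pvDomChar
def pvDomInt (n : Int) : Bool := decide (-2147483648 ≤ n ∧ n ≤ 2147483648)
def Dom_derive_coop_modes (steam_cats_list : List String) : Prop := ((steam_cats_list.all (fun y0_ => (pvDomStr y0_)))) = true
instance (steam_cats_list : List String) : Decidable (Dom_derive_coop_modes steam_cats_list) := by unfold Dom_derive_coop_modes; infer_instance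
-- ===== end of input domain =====

-- B classifies each category into a 3-bit mask, OR-folds the masks, and reads the
-- answer from an 8-entry lookup table, instead of A's three any() scans and branches
-- (objective: alternative).


-- ===== PORT A =====
def derive_coop_modes (steam_cats_list : List String) : List String :=
  let modes : List String := []
  let has_online := steam_cats_list.any (fun c =>
    PySem.Str.isIn "online" c && (PySem.Str.isIn "co-op" c || PySem.Str.isIn "multi" c))
  let has_local := steam_cats_list.any (fun c =>
    (PySem.Str.isIn "local" c && (PySem.Str.isIn "co-op" c || PySem.Str.isIn "multi" c))
      || PySem.Str.isIn "couch" c)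
  let has_split := steam_cats_list.any (fun c => PySem.Str.isIn "split" c)
  let modes := if has_online || (!has_local && !has_split) then modes ++ ["online"] else modes
  let modes := if has_local || has_split then modes ++ ["local"] else modes
  let modes := if has_split then modes ++ ["split"] else modes
  if modes ≠ [] then modes else ["online"]

-- ===== PORT B =====
-- the 8-entry lookup table (_COOP_TABLE in Source B)
def coopTable : List (List String) :=
  [["online"], ["online"], ["local"], ["online", "local"],
   ["local", "split"], ["online", "local", "split"],
   ["local", "split"], ["online", "local", "split"]]

-- _cat_mask: 3-bit mask for one category string (bit0=online, bit1=local, bit2=split)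
def catMask (c : String) : Nat :=
  let coop_or_multi := PySem.Str.isIn "co-op" c || PySem.Str.isIn "multi" c
  (if PySem.Str.isIn "online" c && coop_or_multi then 1 else 0)
    ||| (if (PySem.Str.isIn "local" c && coop_or_multi) || PySem.Str.isIn "couch" c then 2 else 0)
    ||| (if PySem.Str.isIn "split" c then 4 else 0)

def derive_coop_modes_alt (steam_cats_list : List String) : List String :=
  let mask := steam_cats_list.foldl (fun m c => m ||| catMask c) 0
  (PySem.List.pyGet? coopTable (mask : Int)).getD []

-- ===== PRECONDITION & SPEC =====
def Spec_derive_coop_modes (steam_cats_list : List String) (out : List String) : Prop := out = derive_coop_modes_alt steam_cats_list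
instance (steam_cats_list : List String) (out : List String) : Decidable (Spec_derive_coop_modes steam_cats_list out) := by unfold Spec_derive_coop_modes; infer_instance

-- ===== CLAIM (what is proved, stated in full; the proofs are below) =====
def Claim_equal_derive_coop_modes : Prop := ∀ (steam_cats_list : List String), Dom_derive_coop_modes steam_cats_list → Spec_derive_coop_modes steam_cats_list (derive_coop_modes steam_cats_list)

-- ===== LEMMAS AND PROOFS =====
-- encoding of three flags as a 3-bit mask
def coopEncode (ho hl hs : Bool) : Nat :=
  (if ho then 1 else 0) ||| (if hl then 2 else 0) ||| (if hs then 4 else 0)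

theorem coopEncode_lor (a b c a' b' c' : Bool) :
    coopEncode a b c ||| coopEncode a' b' c' = coopEncode (a || a') (b || b') (c || c') := by
  cases a <;> cases b <;> cases c <;> cases a' <;> cases b' <;> cases c' <;> decide

theorem catMask_eq (c : String) :
    catMask c = coopEncode
      (PySem.Str.isIn "online" c && (PySem.Str.isIn "co-op" c || PySem.Str.isIn "multi" c))
      ((PySem.Str.isIn "local" c && (PySem.Str.isIn "co-op" c || PySem.Str.isIn "multi" c))
        || PySem.Str.isIn "couch" c)
      (PySem.Str.isIn "split" c) := rfl

-- the OR-fold computes exactly the encoding of A's three any-scans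
theorem foldl_catMask (l : List String) (a b c : Bool) :
    l.foldl (fun m c => m ||| catMask c) (coopEncode a b c)
      = coopEncode
        (a || l.any (fun c => PySem.Str.isIn "online" c &&
            (PySem.Str.isIn "co-op" c || PySem.Str.isIn "multi" c)))
        (b || l.any (fun c => (PySem.Str.isIn "local" c &&
            (PySem.Str.isIn "co-op" c || PySem.Str.isIn "multi" c)) || PySem.Str.isIn "couch" c))
        (c || l.any (fun c => PySem.Str.isIn "split" c)) := by
  induction l generalizing a b c with
  | nil => simp
  | cons x xs ih =>
    rw [List.foldl_cons, catMask_eq, coopEncode_lor, ih]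
    simp only [List.any_cons, Bool.or_assoc]

-- the table row for a flag encoding equals A's branch construction
theorem coopTable_correct (ho hl hs : Bool) :
    (PySem.List.pyGet? coopTable ((coopEncode ho hl hs : Nat) : Int)).getD []
      = (let modes : List String := []
         let modes := if ho || (!hl && !hs) then modes ++ ["online"] else modes
         let modes := if hl || hs then modes ++ ["local"] else modes
         let modes := if hs then modes ++ ["split"] else modes
         if modes ≠ [] then modes else ["online"]) := by
  cases ho <;> cases hl <;> cases hs <;> decide

-- ===== VERDICT (by name: the statement is the Claim_ definition above) =====
theorem derive_coop_modes_spec : Claim_equal_derive_coop_modes := by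
  intro l _
  show _ = _
  unfold derive_coop_modes derive_coop_modes_alt
  have h0 : (0 : Nat) = coopEncode false false false := rfl
  simp only [h0, foldl_catMask, Bool.false_or, coopTable_correct]
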